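-- pv_equiv track=rewrite | github.com/teco-kit/whar-datasets | src/whar_datasets/config/activity_name_utils.py | canonicalize_activity_name_list
-- ===== SOURCE A (Python) =====
-- from typing import Iterable, List
--
-- def canonicalize_activity_name_list(activity_names: Iterable[object]) -> List[str]:
--     canonical: List[str] = []
--     for name in activity_names:
--         text = str(name).strip()
--         for sep in ("-", "_", "/", "(", ")", ",", ":", ";"):
--             text = text.replace(sep, " ")
--
--         split_parts: List[str] = []
--         for raw_part in text.split():
--             current = ""
--             for char in raw_part:
--                 if current and char.isupper() and current[-1].islower():
--                     split_parts.append(current)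
--                     current = char
--                 else:
--                     current += char
--             if current:
--                 split_parts.append(current)
--
--         canonical.append(
--             " ".join(
--                 part if part.isdigit() else part.capitalize() for part in split_parts
--             )
--         )
--
--     return canonical
-- ===== SOURCE B (Python) =====
-- # One-pass scanner: instead of strip + 8 replace passes + split + per-part state
-- # machine, scan each name once, breaking words at whitespace/separator chars and
-- # at lower->upper camelCase transitions.
--
-- _SEPS = "-_/(),:;"
--
--
-- def _canon_one(name):
--     words = []
--     current = ""
--     for ch in str(name):
--         if ch.isspace() or ch in _SEPS:
--             if current:
--                 words.append(current)
--                 current = ""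
--         elif current and ch.isupper() and current[-1].islower():
--             words.append(current)
--             current = ch
--         else:
--             current += ch
--     if current:
--         words.append(current)
--     return " ".join(w if w.isdigit() else w.capitalize() for w in words)
--
--
-- def canonicalize_activity_name_list(activity_names):
--     return [_canon_one(name) for name in activity_names]
-- ===== Notes on version B (the rewrite author's own statement) =====
-- stated objective: simpler
-- what changed: Replaced A's multi-pass pipeline (strip, eight sequential replace passes, whitespace split, then a per-part camelCase state machine) by a single left-to-right scan per name that breaks words at whitespace/separator characters and at lower-to-upper transitions in one loop.
import Mathlib
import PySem

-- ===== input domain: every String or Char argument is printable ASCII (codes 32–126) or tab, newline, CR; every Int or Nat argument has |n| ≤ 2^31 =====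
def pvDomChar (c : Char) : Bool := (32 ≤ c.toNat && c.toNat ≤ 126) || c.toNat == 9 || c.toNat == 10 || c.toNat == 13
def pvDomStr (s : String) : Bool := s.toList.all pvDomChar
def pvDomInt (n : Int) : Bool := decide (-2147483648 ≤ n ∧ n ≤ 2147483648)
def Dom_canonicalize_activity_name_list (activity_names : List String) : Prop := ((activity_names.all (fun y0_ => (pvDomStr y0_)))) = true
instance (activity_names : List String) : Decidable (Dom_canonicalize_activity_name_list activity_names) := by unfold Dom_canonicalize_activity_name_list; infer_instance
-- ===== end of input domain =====

-- B replaces A's multi-pass pipeline (strip, eight replace passes, split, per-part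
-- state machine) by a single one-pass scanner per name; objective: simpler.

-- shared helper: hand port of Python str.capitalize — exact on ASCII, where the
-- titlecase of the first character coincides with its uppercase
def pvCap (p : List Char) : List Char :=
  match p with
  | [] => []
  | c :: rest => PySem.Chars.upperChar c :: rest.map PySem.Chars.lowerChar

-- ===== PORT A =====
def pvSepsA : List Char := ['-', '_', '/', '(', ')', ',', ':', ';']

-- the body of A's inner character loop over a raw_part
def pvCamelStep (st : List (List Char) × List Char) (ch : Char) : List (List Char) × List Char :=
  if st.2 ≠ [] ∧ PySem.Chars.isupper ch = true ∧ PySem.Chars.islower (st.2.getLastD ' ') = true then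
    (st.1 ++ [st.2], [ch])
  else
    (st.1, st.2 ++ [ch])

def pvProcessA (name : String) : String :=
  let text := PySem.Chars.strip name.toList
  let text := pvSepsA.foldl (fun t sep => PySem.Chars.replace t [sep] [' ']) text
  let split_parts := (PySem.Chars.split₀ text).foldl
    (fun sp raw =>
      let st := raw.foldl pvCamelStep (sp, [])
      if st.2 ≠ [] then st.1 ++ [st.2] else st.1) []
  String.ofList (PySem.Chars.join [' ']
    (split_parts.map (fun p => if PySem.Chars.strIsdigit p then p else pvCap p)))

def canonicalize_activity_name_list (activity_names : List String) : List String :=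
  activity_names.foldl (fun canonical name => canonical ++ [pvProcessA name]) []

-- ===== PORT B =====
def pvSepsB : List Char := "-_/(),:;".toList

-- ch.isspace() or ch in _SEPS (one-character containment = membership, exact)
def pvIsBreak (c : Char) : Bool := PySem.Chars.isspace c || pvSepsB.contains c

-- the body of B's single scanning loop
def pvScanStep (st : List (List Char) × List Char) (ch : Char) : List (List Char) × List Char :=
  if pvIsBreak ch then
    (if st.2 ≠ [] then (st.1 ++ [st.2], []) else st)
  else if st.2 ≠ [] ∧ PySem.Chars.isupper ch = true ∧ PySem.Chars.islower (st.2.getLastD ' ') = true then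
    (st.1 ++ [st.2], [ch])
  else
    (st.1, st.2 ++ [ch])

def pvProcessB (name : String) : String :=
  let st := name.toList.foldl pvScanStep ([], [])
  let words := if st.2 ≠ [] then st.1 ++ [st.2] else st.1
  String.ofList (PySem.Chars.join [' ']
    (words.map (fun w => if PySem.Chars.strIsdigit w then w else pvCap w)))

def canonicalize_activity_name_list_alt (activity_names : List String) : List String :=
  activity_names.map pvProcessB

-- ===== PRECONDITION & SPEC =====
def Spec_canonicalize_activity_name_list (activity_names : List String) (out : List String) : Prop := out = canonicalize_activity_name_list_alt activity_names
instance (activity_names : List String) (out : List String) : Decidable (Spec_canonicalize_activity_name_list activity_names out) := by unfold Spec_canonicalize_activity_name_list; infer_instance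

-- ===== CLAIM (what is proved, stated in full; the proofs are below) =====
def Claim_equal_canonicalize_activity_name_list : Prop := ∀ (activity_names : List String), Dom_canonicalize_activity_name_list activity_names → Spec_canonicalize_activity_name_list activity_names (canonicalize_activity_name_list activity_names)

-- ===== LEMMAS AND PROOFS =====

-- composite effect of A's eight replace passes on one character
def pvF (c : Char) : Char := if pvSepsA.contains c then ' ' else c

-- split₀.go without accumulators (cur is carried reversed, as in go)
def pvS : List Char → List Char → List (List Char)
  | cur, [] => if cur.isEmpty then [] else [cur.reverse]
  | cur, c :: r =>
    if PySem.Chars.isspace c then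
      (if cur.isEmpty then pvS [] r else cur.reverse :: pvS [] r)
    else pvS (c :: cur) r

-- A's camel machine on one part: (tokens emitted, final current)
def pvCamT : List Char → List Char → List (List Char) × List Char
  | cur, [] => ([], cur)
  | cur, c :: r =>
    if cur ≠ [] ∧ PySem.Chars.isupper c = true ∧ PySem.Chars.islower (cur.getLastD ' ') = true then
      ((pvCamT [c] r).1.cons cur, (pvCamT [c] r).2)
    else pvCamT (cur ++ [c]) r

def pvTok (raw : List Char) : List (List Char) :=
  (pvCamT [] raw).1 ++ (if (pvCamT [] raw).2 ≠ [] then [(pvCamT [] raw).2] else [])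

-- the combined tokenizer both sides reduce to, parametrised by the break predicate
def pvT (p : Char → Bool) : List Char → List Char → List (List Char)
  | cur, [] => if cur ≠ [] then [cur] else []
  | cur, c :: r =>
    if p c then (if cur ≠ [] then cur :: pvT p [] r else pvT p [] r)
    else if cur ≠ [] ∧ PySem.Chars.isupper c = true ∧ PySem.Chars.islower (cur.getLastD ' ') = true then
      cur :: pvT p [c] r
    else pvT p (cur ++ [c]) r

theorem replace_go_single (a b : Char) : ∀ (l : List Char) (n : Nat) (acc : List Char),
    l.length ≤ n →
    PySem.Chars.replace.go [a] [b] n l acc = acc.reverse ++ l.map (fun c => if c = a then b else c) := by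
  intro l
  induction l with
  | nil =>
      intro n acc _
      cases n with
      | zero => simp [PySem.Chars.replace.go]
      | succ m => simp [PySem.Chars.replace.go]
  | cons c t ih =>
      intro n acc h
      cases n with
      | zero => simp at h
      | succ m =>
          have h' : t.length ≤ m := by simpa using h
          by_cases hca : a = c
          · subst hca
            simp [PySem.Chars.replace.go, List.isPrefixOf, ih m (b :: acc) h']
          · simp [PySem.Chars.replace.go, List.isPrefixOf, hca, Ne.symm hca, ih m (c :: acc) h']

theorem replace_single (l : List Char) (a b : Char) :
    PySem.Chars.replace l [a] [b] = l.map (fun c => if c = a then b else c) := by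
  have h := replace_go_single a b l l.length [] le_rfl
  simp [PySem.Chars.replace] at h ⊢
  exact h

set_option maxHeartbeats 2000000 in
theorem replaces_eq_map (t : List Char) :
    pvSepsA.foldl (fun t sep => PySem.Chars.replace t [sep] [' ']) t = t.map pvF := by
  simp only [pvSepsA, List.foldl_cons, List.foldl_nil, replace_single, List.map_map]
  refine List.map_congr_left fun c _ => ?_
  by_cases hc : c ∈ pvSepsA
  · simp only [pvSepsA, List.mem_cons, List.not_mem_nil, or_false] at hc
    rcases hc with rfl | rfl | rfl | rfl | rfl | rfl | rfl | rfl <;> decide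
  · have h1 : ¬ c = '-' := fun h => hc (by simp [pvSepsA, h])
    have h2 : ¬ c = '_' := fun h => hc (by simp [pvSepsA, h])
    have h3 : ¬ c = '/' := fun h => hc (by simp [pvSepsA, h])
    have h4 : ¬ c = '(' := fun h => hc (by simp [pvSepsA, h])
    have h5 : ¬ c = ')' := fun h => hc (by simp [pvSepsA, h])
    have h6 : ¬ c = ',' := fun h => hc (by simp [pvSepsA, h])
    have h7 : ¬ c = ':' := fun h => hc (by simp [pvSepsA, h])
    have h8 : ¬ c = ';' := fun h => hc (by simp [pvSepsA, h])
    simp [pvF, h1, h2, h3, h4, h5, h6, h7, h8]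
    exact fun h => absurd h hc

theorem split₀_go_eq : ∀ (cs cur : List Char) (acc : List (List Char)),
    PySem.Chars.split₀.go cs cur acc = acc.reverse ++ pvS cur cs := by
  intro cs
  induction cs with
  | nil =>
      intro cur acc
      by_cases h : cur.isEmpty <;> simp [PySem.Chars.split₀.go, pvS, h]
  | cons c r ih =>
      intro cur acc
      by_cases hs : PySem.Chars.isspace c
      · by_cases hc : cur.isEmpty <;> simp [PySem.Chars.split₀.go, pvS, hs, hc, ih]
      · simp [PySem.Chars.split₀.go, pvS, hs, ih]

theorem camT_fold : ∀ (raw : List Char) (acc : List (List Char)) (cur : List Char),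
    raw.foldl pvCamelStep (acc, cur) = (acc ++ (pvCamT cur raw).1, (pvCamT cur raw).2) := by
  intro raw
  induction raw with
  | nil => intro acc cur; simp [pvCamT]
  | cons c r ih =>
      intro acc cur
      rw [List.foldl_cons]
      by_cases h : cur ≠ [] ∧ PySem.Chars.isupper c = true ∧ PySem.Chars.islower (cur.getLastD ' ') = true
      · rw [show pvCamelStep (acc, cur) c = (acc ++ [cur], [c]) from if_pos h, ih]
        simp only [pvCamT, if_pos h, List.append_assoc, List.singleton_append]
      · rw [show pvCamelStep (acc, cur) c = (acc, cur ++ [c]) from if_neg h, ih]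
        simp only [pvCamT, if_neg h]

theorem camT_ne : ∀ (w cur : List Char), cur ≠ [] ∨ w ≠ [] → (pvCamT cur w).2 ≠ [] := by
  intro w
  induction w with
  | nil =>
      intro cur h
      rcases h with h | h
      · simpa [pvCamT] using h
      · simp at h
  | cons c r ih =>
      intro cur h
      by_cases hb : cur ≠ [] ∧ PySem.Chars.isupper c = true ∧ PySem.Chars.islower (cur.getLastD ' ') = true
      · have e : pvCamT cur (c :: r) = ((pvCamT [c] r).1.cons cur, (pvCamT [c] r).2) := by
          simp only [pvCamT, if_pos hb]
        rw [e]
        exact ih [c] (Or.inl (by simp))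
      · have e : pvCamT cur (c :: r) = pvCamT (cur ++ [c]) r := by
          simp only [pvCamT, if_neg hb]
        rw [e]
        exact ih (cur ++ [c]) (Or.inl (by simp))

theorem camT_snoc : ∀ (w cur : List Char) (c : Char),
    pvCamT cur (w ++ [c]) =
      (if (pvCamT cur w).2 ≠ [] ∧ PySem.Chars.isupper c = true ∧ PySem.Chars.islower ((pvCamT cur w).2.getLastD ' ') = true then
        ((pvCamT cur w).1 ++ [(pvCamT cur w).2], [c])
      else ((pvCamT cur w).1, (pvCamT cur w).2 ++ [c])) := by
  intro w
  induction w with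
  | nil =>
      intro cur c
      by_cases hb : cur ≠ [] ∧ PySem.Chars.isupper c = true ∧ PySem.Chars.islower (cur.getLastD ' ') = true
      · simp [pvCamT]
      · simp [pvCamT]
  | cons d r ih =>
      intro cur c
      by_cases hb : cur ≠ [] ∧ PySem.Chars.isupper d = true ∧ PySem.Chars.islower (cur.getLastD ' ') = true
      · simp only [List.cons_append, pvCamT, hb, ih]
        split_ifs <;> simp
      · simp only [List.cons_append, pvCamT, hb, if_false, ih]


theorem parts_fold : ∀ (parts : List (List Char)) (sp0 : List (List Char)),
    parts.foldl (fun sp raw =>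
      let st := raw.foldl pvCamelStep (sp, [])
      if st.2 ≠ [] then st.1 ++ [st.2] else st.1) sp0 = sp0 ++ parts.flatMap pvTok := by
  intro parts
  induction parts with
  | nil => intro sp0; simp
  | cons raw ps ih =>
      intro sp0
      have e : (if (List.foldl pvCamelStep (sp0, []) raw).2 ≠ [] then
            (List.foldl pvCamelStep (sp0, []) raw).1 ++ [(List.foldl pvCamelStep (sp0, []) raw).2]
          else (List.foldl pvCamelStep (sp0, []) raw).1) = sp0 ++ pvTok raw := by
        rw [camT_fold]
        unfold pvTok
        by_cases h : (pvCamT [] raw).2 ≠ [] <;> simp [h, List.append_assoc]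
      simp only [List.foldl_cons, ih, List.flatMap_cons]
      rw [e]
      simp [List.append_assoc]

theorem grand : ∀ (u w : List Char),
    (pvS w.reverse u).flatMap pvTok = (pvCamT [] w).1 ++ pvT PySem.Chars.isspace (pvCamT [] w).2 u := by
  intro u
  induction u with
  | nil =>
      intro w
      by_cases hw : w = []
      · subst hw; simp [pvS, pvCamT, pvT]
      · have hfrag := camT_ne w [] (Or.inr hw)
        have hne : w.reverse.isEmpty = false := by simpa using hw
        simp only [pvS, hne, Bool.false_eq_true, if_false, List.reverse_reverse,
          List.flatMap_cons, List.flatMap_nil, List.append_nil, pvTok, pvT]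
  | cons c r ih =>
      intro w
      by_cases hs : PySem.Chars.isspace c = true
      · by_cases hw : w = []
        · subst hw
          have e1 : pvS ([] : List Char).reverse (c :: r) = pvS [] r := by
            simp [pvS, hs]
          rw [e1]
          have h0 := ih []
          simp only [List.reverse_nil] at h0
          rw [h0]
          simp only [pvCamT, pvT]
          rw [if_pos hs, if_neg (by simp)]
        · have hfrag := camT_ne w [] (Or.inr hw)
          have hne : w.reverse.isEmpty = false := by simpa using hw
          have e1 : pvS w.reverse (c :: r) = w :: pvS [] r := by
            simp only [pvS]
            rw [if_pos hs, if_neg (by simp [hne])]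
            simp [List.reverse_reverse]
          rw [e1, List.flatMap_cons]
          have h0 := ih []
          simp only [List.reverse_nil, pvCamT] at h0
          rw [h0]
          simp only [pvT]
          rw [if_pos hs, if_pos hfrag]
          simp [pvTok, hfrag, List.append_assoc]
      · have e1 : pvS w.reverse (c :: r) = pvS ((w ++ [c]).reverse) r := by
          simp only [pvS]
          rw [if_neg hs]
          simp [List.reverse_append]
        rw [e1, ih (w ++ [c]), camT_snoc w [] c]
        by_cases hcam : (pvCamT [] w).2 ≠ [] ∧ PySem.Chars.isupper c = true ∧
            PySem.Chars.islower ((pvCamT [] w).2.getLastD ' ') = true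
        · rw [if_pos hcam]
          simp only [pvT]
          rw [if_neg hs, if_pos hcam]
          simp [List.append_assoc]
        · rw [if_neg hcam]
          simp only [pvT]
          rw [if_neg hs, if_neg hcam]

theorem T_all_space : ∀ (post : List Char) (cur : List Char), post.all PySem.Chars.isspace →
    pvT PySem.Chars.isspace cur post = if cur ≠ [] then [cur] else [] := by
  intro post
  induction post with
  | nil => intro cur _; simp [pvT]
  | cons c r ih =>
      intro cur h
      simp only [List.all_cons, Bool.and_eq_true] at h
      have hr : pvT PySem.Chars.isspace [] r = [] := by simpa using ih [] h.2
      by_cases hc : cur ≠ [] <;> simp [pvT, h.1, hc, hr]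

theorem T_append_space : ∀ (y post cur : List Char), post.all PySem.Chars.isspace →
    pvT PySem.Chars.isspace cur (y ++ post) = pvT PySem.Chars.isspace cur y := by
  intro y
  induction y with
  | nil =>
      intro post cur h
      rw [List.nil_append, T_all_space post cur h]
      simp [pvT]
  | cons c yr ih =>
      intro post cur h
      rw [List.cons_append]
      have ih' := fun cur => ih post cur h
      simp only [pvT]
      split_ifs <;> simp [ih']

theorem T_drop_leading : ∀ (cs : List Char),
    pvT PySem.Chars.isspace [] ((cs.dropWhile PySem.Chars.isspace).map pvF) =
      pvT PySem.Chars.isspace [] (cs.map pvF) := by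
  intro cs
  induction cs with
  | nil => rfl
  | cons c r ih =>
      by_cases hs : PySem.Chars.isspace c
      · have hf : PySem.Chars.isspace (pvF c) = true := by
          unfold pvF
          split_ifs
          · decide
          · exact hs
        rw [List.dropWhile_cons_of_pos hs, ih]
        simp [pvT, hf]
      · rw [List.dropWhile_cons_of_neg hs]

theorem T_map : ∀ (cs cur : List Char),
    pvT PySem.Chars.isspace cur (cs.map pvF) = pvT pvIsBreak cur cs := by
  intro cs
  induction cs with
  | nil => intro cur; rfl
  | cons c r ih =>
      intro cur
      have hseps : pvSepsB = pvSepsA := by decide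
      have hbr : PySem.Chars.isspace (pvF c) = pvIsBreak c := by
        unfold pvF pvIsBreak
        rw [hseps]
        by_cases hc : pvSepsA.contains c = true
        · rw [if_pos hc, hc, Bool.or_true]
          decide
        · have hc' : pvSepsA.contains c = false := by simpa using hc
          rw [if_neg (fun h => Bool.false_ne_true (hc' ▸ h)), hc', Bool.or_false]
      simp only [List.map_cons, pvT]
      by_cases hb : pvIsBreak c = true
      · rw [hbr, hb]
        simp only [if_true]
        split_ifs <;> simp [ih]
      · have hb' : pvIsBreak c = false := by simpa using hb
        have hcont : pvSepsA.contains c = false := by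
          unfold pvIsBreak at hb'
          rw [hseps] at hb'
          exact (Bool.or_eq_false_iff.mp hb').2
        have hfc : pvF c = c := by
          unfold pvF
          rw [if_neg (fun h => Bool.false_ne_true (hcont ▸ h))]
        rw [hbr, hb']
        simp only [Bool.false_eq_true, if_false, hfc]
        split_ifs <;> simp [ih]

theorem scan_fold : ∀ (cs : List Char) (ws : List (List Char)) (cur : List Char),
    (let st := cs.foldl pvScanStep (ws, cur)
     if st.2 ≠ [] then st.1 ++ [st.2] else st.1) = ws ++ pvT pvIsBreak cur cs := by
  intro cs
  induction cs with
  | nil =>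
      intro ws cur
      simp only [List.foldl_nil, pvT]
      split_ifs <;> simp
  | cons c r ih =>
      intro ws cur
      simp only [List.foldl_cons]
      by_cases hb : pvIsBreak c = true
      · by_cases hc : cur ≠ []
        · rw [show pvScanStep (ws, cur) c = (ws ++ [cur], []) from by
            simp only [pvScanStep]
            rw [if_pos hb, if_pos hc], ih]
          simp only [pvT]
          rw [if_pos hb, if_pos hc]
          simp [List.append_assoc]
        · have hc' : cur = [] := by simpa using hc
          subst hc'
          rw [show pvScanStep (ws, ([] : List Char)) c = (ws, []) from by
            simp only [pvScanStep]
            rw [if_pos hb, if_neg (by simp)], ih]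
          simp only [pvT]
          rw [if_pos hb, if_neg (by simp)]
      · by_cases hcam : cur ≠ [] ∧ PySem.Chars.isupper c = true ∧ PySem.Chars.islower (cur.getLastD ' ') = true
        · rw [show pvScanStep (ws, cur) c = (ws ++ [cur], [c]) from by
            simp only [pvScanStep]
            rw [if_neg hb, if_pos hcam], ih]
          simp only [pvT]
          rw [if_neg hb, if_pos hcam]
          simp [List.append_assoc]
        · rw [show pvScanStep (ws, cur) c = (ws, cur ++ [c]) from by
            simp only [pvScanStep]
            rw [if_neg hb, if_neg hcam], ih]
          simp only [pvT]
          rw [if_neg hb, if_neg hcam]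

theorem tokensA_eq (L : List Char) :
    ((PySem.Chars.split₀ ((PySem.Chars.strip L).map pvF)).foldl
      (fun sp raw =>
        let st := raw.foldl pvCamelStep (sp, [])
        if st.2 ≠ [] then st.1 ++ [st.2] else st.1) []) = pvT pvIsBreak [] L := by
  have hsplit : PySem.Chars.split₀ ((PySem.Chars.strip L).map pvF)
      = pvS [] ((PySem.Chars.strip L).map pvF) := by
    simp [PySem.Chars.split₀, split₀_go_eq]
  rw [hsplit, parts_fold]
  have hg := grand ((PySem.Chars.strip L).map pvF) []
  simp only [List.reverse_nil, pvCamT, List.nil_append] at hg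
  rw [List.nil_append, hg]
  have hsp : ∀ c : Char, PySem.Chars.isspace c = true → PySem.Chars.isspace (pvF c) = true := by
    intro c h
    unfold pvF
    split_ifs
    · decide
    · exact h
  have hstrip : PySem.Chars.strip L = PySem.Chars.rstrip (PySem.Chars.lstrip L) := rfl
  rw [hstrip]
  have hgen : ∀ y : List Char,
      y = (y.reverse.dropWhile PySem.Chars.isspace).reverse
        ++ (y.reverse.takeWhile PySem.Chars.isspace).reverse := by
    intro y
    conv_lhs => rw [← List.reverse_reverse y,
      ← List.takeWhile_append_dropWhile (p := PySem.Chars.isspace) (l := y.reverse)]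
    rw [List.reverse_append]
  have hdecomp : PySem.Chars.lstrip L
      = PySem.Chars.rstrip (PySem.Chars.lstrip L)
        ++ ((PySem.Chars.lstrip L).reverse.takeWhile PySem.Chars.isspace).reverse :=
    hgen (PySem.Chars.lstrip L)
  have hall : ((((PySem.Chars.lstrip L).reverse.takeWhile PySem.Chars.isspace).reverse).map pvF).all
      PySem.Chars.isspace = true := by
    rw [List.all_eq_true]
    intro a ha
    rw [List.mem_map] at ha
    obtain ⟨b, hb, rfl⟩ := ha
    rw [List.mem_reverse] at hb
    exact hsp b (List.mem_takeWhile_imp hb)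
  have h1 : pvT PySem.Chars.isspace [] ((PySem.Chars.rstrip (PySem.Chars.lstrip L)).map pvF)
      = pvT PySem.Chars.isspace [] ((PySem.Chars.lstrip L).map pvF) := by
    conv_rhs => rw [hdecomp]
    rw [List.map_append, T_append_space _ _ _ hall]
  rw [h1]
  have h2 : PySem.Chars.lstrip L = L.dropWhile PySem.Chars.isspace := rfl
  rw [h2, T_drop_leading, T_map]

theorem process_eq (name : String) : pvProcessA name = pvProcessB name := by
  show String.ofList (PySem.Chars.join [' ']
      (((PySem.Chars.split₀ (pvSepsA.foldl (fun t sep => PySem.Chars.replace t [sep] [' '])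
            (PySem.Chars.strip name.toList))).foldl
        (fun sp raw =>
          let st := raw.foldl pvCamelStep (sp, [])
          if st.2 ≠ [] then st.1 ++ [st.2] else st.1) []).map
        (fun p => if PySem.Chars.strIsdigit p then p else pvCap p)))
    = String.ofList (PySem.Chars.join [' ']
      ((let st := name.toList.foldl pvScanStep ([], [])
        if st.2 ≠ [] then st.1 ++ [st.2] else st.1).map
        (fun w => if PySem.Chars.strIsdigit w then w else pvCap w)))
  rw [replaces_eq_map, tokensA_eq, scan_fold]
  simp

-- ===== VERDICT (by name: the statement is the Claim_ definition above) =====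
theorem top_fold : ∀ (xs : List String) (acc : List String),
    xs.foldl (fun canonical name => canonical ++ [pvProcessA name]) acc = acc ++ xs.map pvProcessB := by
  intro xs
  induction xs with
  | nil => intro acc; simp [List.foldl]
  | cons x xs ih =>
      intro acc
      rw [List.foldl_cons, ih, process_eq]
      simp

theorem canonicalize_activity_name_list_spec : Claim_equal_canonicalize_activity_name_list := by
  intro names _
  show _ = _
  unfold canonicalize_activity_name_list canonicalize_activity_name_list_alt
  simpa using top_fold names []
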